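-- pv_equiv track=rewrite | github.com/pritesh2804patel-creator/Rakshanetra- | modules/decoy_generator.py | generate_decoy
-- ===== SOURCE A (Python) =====
-- def generate_decoy(query):
--     query = query.lower()
--     if any(word in query for word in ["vpn", "proxy", "mask", "cloak"]):
--         return "Deploy Phantom Gateway"
--     elif any(word in query for word in ["fake news", "rumor", "hoax"]):
--         return "Release Truth Mirage"
--     elif any(word in query for word in ["spy", "surveillance", "espionage"]):
--         return "Activate Shadow Pulse"
--     elif any(word in query for word in ["attack", "bomb", "weapon", "hack"]):
--         return "Trigger Firewall Bloom"
--     else: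
--         return "Echo Silence Protocol"
-- ===== SOURCE B (Python) =====
-- KEYWORD_PRIORITY = {
--     "vpn": 0, "proxy": 0, "mask": 0, "cloak": 0,
--     "fake news": 1, "rumor": 1, "hoax": 1,
--     "spy": 2, "surveillance": 2, "espionage": 2,
--     "attack": 3, "bomb": 3, "weapon": 3, "hack": 3,
-- }
-- RESPONSES = [
--     "Deploy Phantom Gateway",
--     "Release Truth Mirage",
--     "Activate Shadow Pulse",
--     "Trigger Firewall Bloom",
-- ]
--
-- def generate_decoy(query):
--     q = query.lower()
--     best = len(RESPONSES)
--     for i in range(len(q)):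
--         for kw, prio in KEYWORD_PRIORITY.items():
--             if prio < best and q.startswith(kw, i):
--                 best = prio
--     return RESPONSES[best] if best < len(RESPONSES) else "Echo Silence Protocol"
-- ===== Notes on version B (the rewrite author's own statement) =====
-- stated objective: alternative
-- what changed: Instead of four ordered any(word in query) branch tests, B makes a single position scan over the query, testing each keyword with startswith at every index and aggregating the minimum matched priority, then indexes a response table; correctness relies on first-matching-group = minimum-priority-matched-group.
import Mathlib
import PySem

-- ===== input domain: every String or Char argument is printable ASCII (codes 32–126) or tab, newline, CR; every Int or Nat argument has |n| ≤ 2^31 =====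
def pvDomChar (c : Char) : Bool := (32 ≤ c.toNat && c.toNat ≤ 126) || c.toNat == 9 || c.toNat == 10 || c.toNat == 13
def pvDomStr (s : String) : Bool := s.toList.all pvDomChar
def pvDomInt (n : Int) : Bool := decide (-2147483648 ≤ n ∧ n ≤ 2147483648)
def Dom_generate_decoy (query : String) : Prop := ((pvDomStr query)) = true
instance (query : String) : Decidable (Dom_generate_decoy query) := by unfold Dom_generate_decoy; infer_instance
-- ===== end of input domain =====

-- B replaces A's ordered any(word in query) branch chain by a single position scan of the
-- query that aggregates the minimum matched keyword priority (objective: alternative).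
-- In both ports the local q = query.lower() is inlined as (PySem.Str.lower query).
-- ===== PORT A =====
def generate_decoy (query : String) : String :=
  if (["vpn", "proxy", "mask", "cloak"].any (fun word => PySem.Str.isIn word (PySem.Str.lower query))) then
    "Deploy Phantom Gateway"
  else if (["fake news", "rumor", "hoax"].any (fun word => PySem.Str.isIn word (PySem.Str.lower query))) then
    "Release Truth Mirage"
  else if (["spy", "surveillance", "espionage"].any (fun word => PySem.Str.isIn word (PySem.Str.lower query))) then
    "Activate Shadow Pulse"
  else if (["attack", "bomb", "weapon", "hack"].any (fun word => PySem.Str.isIn word (PySem.Str.lower query))) then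
    "Trigger Firewall Bloom"
  else
    "Echo Silence Protocol"

-- ===== PORT B =====
def pvKeywordPriority : List (String × Nat) :=
  [("vpn", 0), ("proxy", 0), ("mask", 0), ("cloak", 0),
   ("fake news", 1), ("rumor", 1), ("hoax", 1),
   ("spy", 2), ("surveillance", 2), ("espionage", 2),
   ("attack", 3), ("bomb", 3), ("weapon", 3), ("hack", 3)]

def pvResponses : List String :=
  ["Deploy Phantom Gateway", "Release Truth Mirage",
   "Activate Shadow Pulse", "Trigger Firewall Bloom"]

-- Source B's final return line
def pvFinish (best : Nat) : String :=
  if best < pvResponses.length then pvResponses.getD best "" else "Echo Silence Protocol"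

-- q.startswith(kw, i) for 0 ≤ i < len(q) is exactly: kw is a list-prefix of q[i:] (exact here).
def generate_decoy_alt (query : String) : String :=
  pvFinish
    ((List.range (PySem.Str.lower query).toList.length).foldl
      (fun best i =>
        pvKeywordPriority.foldl
          (fun best kp =>
            if kp.2 < best && List.isPrefixOf kp.1.toList ((PySem.Str.lower query).toList.drop i)
            then kp.2 else best)
          best)
      pvResponses.length)

-- ===== PRECONDITION & SPEC =====
def Spec_generate_decoy (query : String) (out : String) : Prop := out = generate_decoy_alt query
instance (query : String) (out : String) : Decidable (Spec_generate_decoy query out) := by unfold Spec_generate_decoy; infer_instance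

-- ===== CLAIM (what is proved, stated in full; the proofs are below) =====
def Claim_equal_generate_decoy : Prop := ∀ (query : String), Dom_generate_decoy query → Spec_generate_decoy query (generate_decoy query)

-- ===== LEMMAS AND PROOFS =====

-- the priorities of the table entries that match at position i of cs
def pvMatches (cs : List Char) (i : Nat) : List Nat :=
  ((pvKeywordPriority.filter (fun kp => List.isPrefixOf kp.1.toList (cs.drop i))).map Prod.snd)

-- B's aggregated minimum priority, as a min-fold over the matched priorities
def pvR (cs : List Char) : Nat :=
  (List.range cs.length).foldl (fun b i => (pvMatches cs i).foldl min b) 4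

-- the inner keyword fold is a min-fold over the matched priorities
theorem inner_fold_gen (cs : List Char) (i : Nat) :
    ∀ (l : List (String × Nat)) (b : Nat),
      l.foldl (fun b kp =>
          if kp.2 < b && List.isPrefixOf kp.1.toList (cs.drop i) then kp.2 else b) b
        = ((l.filter (fun kp => List.isPrefixOf kp.1.toList (cs.drop i))).map Prod.snd).foldl min b := by
  intro l
  induction l with
  | nil => intro b; rfl
  | cons x xs ih =>
    intro b
    by_cases h : List.isPrefixOf x.1.toList (cs.drop i) = true
    · simp only [List.foldl_cons, List.filter_cons, h, if_pos, List.map_cons, ih]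
      congr 1
      simp only [Bool.and_true, decide_eq_true_eq]
      rcases Nat.lt_or_ge x.2 b with hlt | hge
      · rw [if_pos hlt, Nat.min_eq_right hlt.le]
      · rw [if_neg (Nat.not_lt.mpr hge), Nat.min_eq_left hge]
    · simp only [List.foldl_cons, List.filter_cons, h, Bool.false_eq_true, if_false,
        Bool.and_false, ih]

-- rewrite the alt port through pvR
theorem alt_eq (query : String) :
    generate_decoy_alt query = pvFinish (pvR (PySem.Str.lower query).toList) := by
  unfold generate_decoy_alt pvR
  have hfun : (fun (best : Nat) (i : Nat) =>
      pvKeywordPriority.foldl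
        (fun best kp =>
          if kp.2 < best && List.isPrefixOf kp.1.toList ((PySem.Str.lower query).toList.drop i)
          then kp.2 else best)
        best)
      = fun b i => (pvMatches (PySem.Str.lower query).toList i).foldl min b := by
    funext b i
    unfold pvMatches
    exact inner_fold_gen (PySem.Str.lower query).toList i pvKeywordPriority b
  rw [hfun]
  rfl

theorem min_foldl_le (L : List Nat) : ∀ b, L.foldl min b ≤ b := by
  induction L with
  | nil => intro b; exact le_refl b
  | cons x xs ih =>
    intro b
    exact le_trans (ih (min b x)) (Nat.min_le_left b x)

theorem min_foldl_le_mem (L : List Nat) : ∀ b x, x ∈ L → L.foldl min b ≤ x := by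
  induction L with
  | nil => intro b x hx; cases hx
  | cons y ys ih =>
    intro b x hx
    rcases List.mem_cons.mp hx with h | h
    · subst h
      exact le_trans (min_foldl_le ys (min b x)) (Nat.min_le_right b x)
    · exact ih _ _ h

theorem min_foldl_eq_or_mem (L : List Nat) : ∀ b, L.foldl min b = b ∨ L.foldl min b ∈ L := by
  induction L with
  | nil => intro b; exact Or.inl rfl
  | cons y ys ih =>
    intro b
    rcases ih (min b y) with h | h
    · rcases Nat.le_total b y with hby | hyb
      · exact Or.inl ((h.trans (Nat.min_eq_left hby) : List.foldl min b (y :: ys) = b))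
      · exact Or.inr (List.mem_cons.mpr (Or.inl
          ((h.trans (Nat.min_eq_right hyb) : List.foldl min b (y :: ys) = y))))
    · exact Or.inr (List.mem_cons_of_mem _ h)

-- the nested fold: ≤ the seed, ≤ every matched priority, and equals the seed or a matched priority
theorem nested_fold_spec (cs : List Char) :
    ∀ (l : List Nat) (b : Nat),
      (l.foldl (fun b i => (pvMatches cs i).foldl min b) b ≤ b)
      ∧ (∀ i ∈ l, ∀ x ∈ pvMatches cs i, l.foldl (fun b i => (pvMatches cs i).foldl min b) b ≤ x)
      ∧ (l.foldl (fun b i => (pvMatches cs i).foldl min b) b = b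
          ∨ ∃ i ∈ l, l.foldl (fun b i => (pvMatches cs i).foldl min b) b ∈ pvMatches cs i) := by
  intro l
  induction l with
  | nil =>
    intro b
    refine ⟨le_refl b, ?_, Or.inl rfl⟩
    intro i hi; cases hi
  | cons j js ih =>
    intro b
    obtain ⟨h1, h2, h3⟩ := ih ((pvMatches cs j).foldl min b)
    refine ⟨le_trans h1 (min_foldl_le _ b), ?_, ?_⟩
    · intro i hi x hx
      rcases List.mem_cons.mp hi with h | h
      · subst h
        exact le_trans h1 (min_foldl_le_mem _ b x hx)
      · exact h2 i h x hx
    · rcases h3 with h | ⟨i, hi, hmem⟩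
      · rcases min_foldl_eq_or_mem (pvMatches cs j) b with h' | h'
        · exact Or.inl (h.trans h')
        · exact Or.inr ⟨j, List.mem_cons_self, h.symm ▸ h'⟩
      · exact Or.inr ⟨i, List.mem_cons_of_mem _ hi, hmem⟩

theorem pvR_spec (cs : List Char) :
    pvR cs ≤ 4
    ∧ (∀ i ∈ List.range cs.length, ∀ x ∈ pvMatches cs i, pvR cs ≤ x)
    ∧ (pvR cs = 4 ∨ ∃ i ∈ List.range cs.length, pvR cs ∈ pvMatches cs i) :=
  nested_fold_spec cs (List.range cs.length) 4

-- g is matched at some position of cs iff some table keyword of priority g occurs in cs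
theorem matches_iff (cs : List Char) (g : Nat) :
    (∃ i ∈ List.range cs.length, g ∈ pvMatches cs i) ↔
    (∃ kp ∈ pvKeywordPriority, kp.2 = g ∧ PySem.Chars.isIn kp.1.toList cs = true) := by
  constructor
  · rintro ⟨i, _, hg⟩
    unfold pvMatches at hg
    rcases List.mem_map.mp hg with ⟨kp, hkp, hsnd⟩
    rcases List.mem_filter.mp hkp with ⟨hmem, hpref⟩
    exact ⟨kp, hmem, hsnd,
      (PySem.Chars.exists_prefix_drop_iff_isIn _ _).mp
        ⟨i, List.isPrefixOf_iff_prefix.mp hpref⟩⟩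
  · rintro ⟨kp, hmem, hsnd, hin⟩
    have hne : kp.1.toList ≠ [] := by
      have hall : ∀ kp ∈ pvKeywordPriority, kp.1.toList ≠ [] := by decide
      exact hall kp hmem
    rcases (PySem.Chars.exists_prefix_drop_iff_isIn _ _).mpr hin with ⟨j, hj⟩
    have hjlt : j < cs.length := by
      by_contra hge
      rw [List.drop_eq_nil_of_le (le_of_not_gt (fun h => hge h))] at hj
      exact hne (List.prefix_nil.mp hj)
    exact ⟨j, List.mem_range.mpr hjlt,
      List.mem_map.mpr ⟨kp,
        List.mem_filter.mpr ⟨hmem, List.isPrefixOf_iff_prefix.mpr hj⟩, hsnd⟩⟩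

-- A's four branch conditions, restated over the table
theorem cond0_iff (q : String) :
    ((["vpn", "proxy", "mask", "cloak"].any (fun word => PySem.Str.isIn word q)) = true) ↔
    (∃ kp ∈ pvKeywordPriority, kp.2 = 0 ∧ PySem.Chars.isIn kp.1.toList q.toList = true) := by
  simp only [List.any_eq_true, PySem.Str.isIn_eq, pvKeywordPriority]
  simp

theorem cond1_iff (q : String) :
    ((["fake news", "rumor", "hoax"].any (fun word => PySem.Str.isIn word q)) = true) ↔
    (∃ kp ∈ pvKeywordPriority, kp.2 = 1 ∧ PySem.Chars.isIn kp.1.toList q.toList = true) := by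
  simp only [List.any_eq_true, PySem.Str.isIn_eq, pvKeywordPriority]
  simp

theorem cond2_iff (q : String) :
    ((["spy", "surveillance", "espionage"].any (fun word => PySem.Str.isIn word q)) = true) ↔
    (∃ kp ∈ pvKeywordPriority, kp.2 = 2 ∧ PySem.Chars.isIn kp.1.toList q.toList = true) := by
  simp only [List.any_eq_true, PySem.Str.isIn_eq, pvKeywordPriority]
  simp

theorem cond3_iff (q : String) :
    ((["attack", "bomb", "weapon", "hack"].any (fun word => PySem.Str.isIn word q)) = true) ↔
    (∃ kp ∈ pvKeywordPriority, kp.2 = 3 ∧ PySem.Chars.isIn kp.1.toList q.toList = true) := by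
  simp only [List.any_eq_true, PySem.Str.isIn_eq, pvKeywordPriority]
  simp

theorem matches_lt_four (cs : List Char) (i : Nat) : ∀ x ∈ pvMatches cs i, x < 4 := by
  intro x hx
  unfold pvMatches at hx
  rcases List.mem_map.mp hx with ⟨kp, hkp, hsnd⟩
  have hall : ∀ kp ∈ pvKeywordPriority, kp.2 < 4 := by decide
  exact hsnd ▸ hall kp (List.mem_filter.mp hkp).1

-- ===== VERDICT (by name: the statement is the Claim_ definition above) =====
theorem generate_decoy_spec : Claim_equal_generate_decoy := by
  intro query _
  unfold Spec_generate_decoy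
  rw [alt_eq]
  unfold generate_decoy
  obtain ⟨hle, hmem, heq⟩ := pvR_spec (PySem.Str.lower query).toList
  by_cases c0 : (["vpn", "proxy", "mask", "cloak"].any
      (fun word => PySem.Str.isIn word (PySem.Str.lower query))) = true
  · have hr : pvR (PySem.Str.lower query).toList = 0 := by
      obtain ⟨i, hi, h0⟩ := (matches_iff _ 0).mpr ((cond0_iff _).mp c0)
      exact Nat.le_zero.mp (hmem i hi 0 h0)
    rw [if_pos c0, hr]
    rfl
  · have nc0 : pvR (PySem.Str.lower query).toList ≠ 0 := by
      intro h0
      rcases heq with h | ⟨i, hi, hm⟩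
      · omega
      · exact c0 ((cond0_iff _).mpr ((matches_iff _ 0).mp ⟨i, hi, h0 ▸ hm⟩))
    rw [if_neg c0]
    by_cases c1 : (["fake news", "rumor", "hoax"].any
        (fun word => PySem.Str.isIn word (PySem.Str.lower query))) = true
    · have hr : pvR (PySem.Str.lower query).toList = 1 := by
        obtain ⟨i, hi, h1⟩ := (matches_iff _ 1).mpr ((cond1_iff _).mp c1)
        have := hmem i hi 1 h1
        omega
      rw [if_pos c1, hr]
      rfl
    · have nc1 : pvR (PySem.Str.lower query).toList ≠ 1 := by
        intro h1
        rcases heq with h | ⟨i, hi, hm⟩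
        · omega
        · exact c1 ((cond1_iff _).mpr ((matches_iff _ 1).mp ⟨i, hi, h1 ▸ hm⟩))
      rw [if_neg c1]
      by_cases c2 : (["spy", "surveillance", "espionage"].any
          (fun word => PySem.Str.isIn word (PySem.Str.lower query))) = true
      · have hr : pvR (PySem.Str.lower query).toList = 2 := by
          obtain ⟨i, hi, h2⟩ := (matches_iff _ 2).mpr ((cond2_iff _).mp c2)
          have := hmem i hi 2 h2
          omega
        rw [if_pos c2, hr]
        rfl
      · have nc2 : pvR (PySem.Str.lower query).toList ≠ 2 := by
          intro h2
          rcases heq with h | ⟨i, hi, hm⟩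
          · omega
          · exact c2 ((cond2_iff _).mpr ((matches_iff _ 2).mp ⟨i, hi, h2 ▸ hm⟩))
        rw [if_neg c2]
        by_cases c3 : (["attack", "bomb", "weapon", "hack"].any
            (fun word => PySem.Str.isIn word (PySem.Str.lower query))) = true
        · have hr : pvR (PySem.Str.lower query).toList = 3 := by
            obtain ⟨i, hi, h3⟩ := (matches_iff _ 3).mpr ((cond3_iff _).mp c3)
            have := hmem i hi 3 h3
            omega
          rw [if_pos c3, hr]
          rfl
        · have nc3 : pvR (PySem.Str.lower query).toList ≠ 3 := by
            intro h3
            rcases heq with h | ⟨i, hi, hm⟩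
            · omega
            · exact c3 ((cond3_iff _).mpr ((matches_iff _ 3).mp ⟨i, hi, h3 ▸ hm⟩))
          have hr : pvR (PySem.Str.lower query).toList = 4 := by
            rcases heq with h | ⟨i, hi, hm⟩
            · exact h
            · have := matches_lt_four _ i _ hm
              omega
          rw [if_neg c3, hr]
          rfl
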